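-- pv_equiv track=rewrite | github.com/tankarageldi/leetcode | medium/1400.py | canConstruct
-- ===== SOURCE A (Python) =====
-- def canConstruct(s: str, k: int) -> bool:
--     if len(s) < k:
--         return False
--
--     d =  {}
--     for char in s:
--         if char in d:
--             d[char] += 1
--         else:
--             d[char] = 1
--     odd_count = 0
--     even_count = 0
--     for key,value in d.items():
--         if value % 2 == 1:
--             odd_count += 1
--         else:
--             even_count += 1
--     if odd_count > k:
--         return False
--
--     return True
--
-- s = "annabelle"
--
-- k = 2
-- ===== SOURCE B (Python) =====
-- def canConstruct(s: str, k: int) -> bool: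
--     if len(s) < k:
--         return False
--     parity = set()
--     for ch in s:
--         if ch in parity:
--             parity.discard(ch)
--         else:
--             parity.add(ch)
--     return len(parity) <= k
-- ===== Notes on version B (the rewrite author's own statement) =====
-- stated objective: simpler
-- what changed: Replaces the frequency dictionary plus a second pass over its items with a single parity-toggle set pass: each character is removed from the set if present, else added, so the set size is directly the number of odd-frequency characters.
import Mathlib
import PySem

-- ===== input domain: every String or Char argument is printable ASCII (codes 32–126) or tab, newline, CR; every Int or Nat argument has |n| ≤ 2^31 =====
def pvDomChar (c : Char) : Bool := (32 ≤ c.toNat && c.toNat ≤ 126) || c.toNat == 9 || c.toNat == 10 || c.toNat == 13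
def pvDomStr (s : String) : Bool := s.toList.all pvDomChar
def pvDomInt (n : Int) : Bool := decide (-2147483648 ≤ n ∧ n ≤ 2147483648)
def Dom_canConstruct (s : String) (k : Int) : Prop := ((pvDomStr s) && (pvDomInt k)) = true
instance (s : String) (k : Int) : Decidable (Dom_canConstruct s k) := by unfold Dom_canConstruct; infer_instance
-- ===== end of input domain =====

-- B replaces A's frequency dictionary + second pass over its items by a single
-- parity-toggle set pass (objective: simpler; same O(n) cost).

-- ===== PORT A =====
def canConstruct (s : String) (k : Int) : Bool :=
  if PySem.Str.len s < k then false
  else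
    let d := s.toList.foldl
      (fun (d : PySem.Dict Char Int) c =>
        if d.contains c then d.modify c 0 (· + 1) else d.insert c 1)
      PySem.Dict.empty
    let counts := d.items.foldl
      (fun (p : Int × Int) kv =>
        if PySem.Int.mod kv.2 2 = 1 then (p.1 + 1, p.2) else (p.1, p.2 + 1))
      (0, 0)
    if counts.1 > k then false else true

-- ===== PORT B =====
-- loop body of B's parity pass: toggle membership of c in the set
def pvToggle (st : PySem.Set Char) (c : Char) : PySem.Set Char :=
  if st.contains c then st.discard c else st.add c

def canConstruct_alt (s : String) (k : Int) : Bool :=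
  if PySem.Str.len s < k then false
  else
    let parity := s.toList.foldl pvToggle PySem.Set.empty
    decide ((PySem.Set.len parity : Int) ≤ k)

-- ===== PRECONDITION & SPEC =====
def Spec_canConstruct (s : String) (k : Int) (out : Bool) : Prop := out = canConstruct_alt s k
instance (s : String) (k : Int) (out : Bool) : Decidable (Spec_canConstruct s k out) := by unfold Spec_canConstruct; infer_instance

-- ===== CLAIM (what is proved, stated in full; the proofs are below) =====
def Claim_equal_canConstruct : Prop := ∀ (s : String) (k : Int), Dom_canConstruct s k → Spec_canConstruct s k (canConstruct s k)

-- ===== LEMMAS AND PROOFS =====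

-- B's toggle loop: the result has no duplicates and c is in it iff its membership
-- in the start set disagrees with the parity of its count in xs.
lemma toggle_spec (xs : List Char) (st : List Char) (h : st.Nodup) :
    (xs.foldl pvToggle st).Nodup ∧
      ∀ c, c ∈ xs.foldl pvToggle st ↔ ((c ∈ st) ↔ xs.count c % 2 = 0) := by
  induction xs generalizing st with
  | nil => simp [h]
  | cons x xs ih =>
    have hst' : (pvToggle st x).Nodup := by
      unfold pvToggle
      split
      · exact h.filter _
      · simp only [PySem.Set.add]
        split
        · exact h
        · exact List.Nodup.append h (List.nodup_singleton x) (by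
            simp_all [PySem.Set.contains, List.disjoint_singleton])
    obtain ⟨hnd, hmem⟩ := ih (pvToggle st x) hst'
    refine ⟨hnd, fun c => ?_⟩
    rw [List.foldl_cons, hmem c]
    by_cases hc : c = x
    · subst hc
      have hx : c ∈ pvToggle st c ↔ ¬ c ∈ st := by
        unfold pvToggle; split <;> simp_all [PySem.Set.discard, PySem.Set.add, PySem.Set.contains]
      rw [hx, List.count_cons_self]
      by_cases hm : c ∈ st <;> simp [hm] <;> omega
    · have hx : c ∈ pvToggle st x ↔ c ∈ st := by
        unfold pvToggle
        split <;> simp_all [PySem.Set.discard, PySem.Set.add, PySem.Set.contains]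
      have hcount : List.count c (x :: xs) = List.count c xs := by
        simp [Ne.symm hc]
      rw [hx, hcount]

-- A's counting loop builds exactly Counter(xs)
lemma dictfold_eq_counter (xs : List Char) :
    xs.foldl
      (fun (d : PySem.Dict Char Int) c =>
        if d.contains c then d.modify c 0 (· + 1) else d.insert c 1)
      PySem.Dict.empty = PySem.Dict.counter xs := by
  have hf : (fun (d : PySem.Dict Char Int) c =>
        if d.contains c then d.modify c 0 (· + 1) else d.insert c 1)
      = (fun (d : PySem.Dict Char Int) c => d.modify c 0 (· + 1)) := by
    funext d c
    split
    · rfl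
    · next hnc =>
      simp only [PySem.Dict.modify,
        PySem.Dict.getD_of_not_contains d 0 (by simpa using hnc)]
      norm_num
  rw [hf, PySem.Dict.counter_eq_foldl]

-- A's second loop: the first component counts the odd-valued items
lemma pairfold_fst (l : List (Char × Int)) (a b : Int) :
    (l.foldl
      (fun (p : Int × Int) kv =>
        if PySem.Int.mod kv.2 2 = 1 then (p.1 + 1, p.2) else (p.1, p.2 + 1))
      (a, b)).1 = a + l.countP (fun kv => PySem.Int.mod kv.2 2 == 1) := by
  induction l generalizing a b with
  | nil => simp
  | cons kv l ih =>
    simp only [List.foldl_cons, List.countP_cons]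
    by_cases hodd : PySem.Int.mod kv.2 2 = 1
    · have hb : (PySem.Int.mod kv.2 2 == 1) = true := by simpa using hodd
      rw [if_pos hodd, ih, hb]
      simp
      ring
    · have hb : (PySem.Int.mod kv.2 2 == 1) = false := by simpa using hodd
      rw [if_neg hodd, ih, hb]
      simp

-- the two counts agree: A's odd_count equals the size of B's parity set
lemma odd_count_eq (xs : List Char) :
    ((PySem.Dict.counter xs).items.countP (fun kv => PySem.Int.mod kv.2 2 == 1) : Int)
      = PySem.Set.len (xs.foldl pvToggle PySem.Set.empty) := by
  have hperm : (xs.foldl pvToggle PySem.Set.empty).Perm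
      ((PySem.Set.ofList xs).filter (fun c => xs.count c % 2 == 1)) := by
    obtain ⟨hnd, hmem⟩ := toggle_spec xs [] (List.nodup_nil)
    simp only [PySem.Set.empty]
    rw [List.perm_ext_iff_of_nodup hnd ((PySem.Set.nodup_ofList xs).filter _)]
    intro c
    rw [hmem c, List.mem_filter, PySem.Set.mem_ofList]
    constructor
    · intro h
      have h1 : ¬ xs.count c % 2 = 0 := by simpa using h
      have h2 : xs.count c % 2 = 1 := by omega
      have h3 : 0 < xs.count c := by omega
      exact ⟨List.count_pos_iff.mp h3, by simpa using h2⟩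
    · intro ⟨_, h2⟩
      have : xs.count c % 2 = 1 := by simpa using h2
      simp; omega
  have hlen : (xs.foldl pvToggle PySem.Set.empty).length
      = (PySem.Set.ofList xs).countP (fun c => xs.count c % 2 == 1) := by
    rw [hperm.length_eq, ← List.countP_eq_length_filter]
  have hitems : (PySem.Dict.counter xs).items.countP (fun kv => PySem.Int.mod kv.2 2 == 1)
      = (PySem.Set.ofList xs).countP (fun c => xs.count c % 2 == 1) := by
    rw [PySem.Dict.items_counter, List.countP_map]
    have hpred : ((fun (kv : Char × Int) => PySem.Int.mod kv.2 2 == 1) ∘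
        (fun c => (c, (xs.count c : Int)))) = (fun c => xs.count c % 2 == 1) := by
      funext c
      have hm : PySem.Int.mod ((xs.count c : Nat) : Int) 2 = ((xs.count c % 2 : Nat) : Int) := by
        exact_mod_cast PySem.Int.mod_natCast (xs.count c) 2
      simp only [Function.comp_apply, hm]
      by_cases h : xs.count c % 2 = 1
      · simp [h]
      · have h0 : xs.count c % 2 = 0 := by omega
        simp [h0]
    rw [hpred]
  rw [hitems, PySem.Set.len, hlen]

-- ===== VERDICT (by name: the statement is the Claim_ definition above) =====
theorem canConstruct_spec : Claim_equal_canConstruct := by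
  intro s k _
  unfold Spec_canConstruct canConstruct canConstruct_alt
  by_cases hlt : PySem.Str.len s < k
  · rw [if_pos hlt, if_pos hlt]
  · rw [if_neg hlt, if_neg hlt]
    dsimp only
    rw [dictfold_eq_counter, pairfold_fst, zero_add, odd_count_eq s.toList]
    by_cases hgt : PySem.Set.len (s.toList.foldl pvToggle PySem.Set.empty) < k + 1
    · rw [if_neg (by omega), eq_comm, decide_eq_true_eq]; omega
    · rw [if_pos (by omega), eq_comm, decide_eq_false_iff_not]; omega
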